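-- pv_equiv track=rewrite | github.com/donky16/OUC-JWGL | app/des_enc.py | getKeyBytes
-- ===== SOURCE A (Python) =====
-- def getKeyBytes(key):
--     keyBytes = []
--     leng = len(key)
--     iterator = int(leng / 4)
--     remainder = leng % 4
--     i = 0
--     for i in range(0, iterator):
--         keyBytes.append(strToBt(key[i * 4 + 0:i * 4 + 4]))
--         i += 1
--     if remainder > 0:
--         keyBytes.append(strToBt(key[i * 4 + 0:leng]))
--     return keyBytes
--
-- def strToBt(str):
--     leng = len(str)
--     bt = [None] * 64
--     if leng < 4:
--         for i in range(0, leng):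
--             k = ord(str[i])
--             for j in range(0, 16):
--                 pow = 1
--                 for m in range(15, j, -1):
--                     pow *= 2
--                 bt[16 * i + j] = int(k / pow) % 2
--         for p in range(leng, 4):
--             k = 0
--             for q in range(0, 16):
--                 pow = 1
--                 for m in range(15, q, -1):
--                     pow *= 2
--                 bt[16 * p + q] = int(k / pow) % 2
--     else:
--         for i in range(0, 4):
--             k = ord(str[i])
--             for j in range(0, 16):
--                 pow = 1
--                 for m in range(15, j, -1):
--                     pow *= 2
--                 bt[16 * i + j] = int(k / pow) % 2
--     return bt
-- ===== SOURCE B (Python) =====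
-- def getKeyBytes(key):
--     out = []
--     for start in range(0, len(key), 4):
--         chunk = (key[start:start + 4] + '\x00\x00\x00\x00')[:4]
--         bits = []
--         for c in chunk:
--             bits.extend(int(b) for b in format(ord(c) & 0xFFFF, '016b'))
--         out.append(bits)
--     return out
-- ===== Notes on version B (the rewrite author's own statement) =====
-- stated objective: simpler
-- what changed: Replaces A's chunk-index loop with its i-bookkeeping plus the 64-slot strToBt helper (three nested-loop branches that recompute each bit's power of two in an inner loop) by a single pass over the key in steps of 4 that pads each chunk to 4 chars and emits the 16 bits of each char directly via a binary format string.
import Mathlib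
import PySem

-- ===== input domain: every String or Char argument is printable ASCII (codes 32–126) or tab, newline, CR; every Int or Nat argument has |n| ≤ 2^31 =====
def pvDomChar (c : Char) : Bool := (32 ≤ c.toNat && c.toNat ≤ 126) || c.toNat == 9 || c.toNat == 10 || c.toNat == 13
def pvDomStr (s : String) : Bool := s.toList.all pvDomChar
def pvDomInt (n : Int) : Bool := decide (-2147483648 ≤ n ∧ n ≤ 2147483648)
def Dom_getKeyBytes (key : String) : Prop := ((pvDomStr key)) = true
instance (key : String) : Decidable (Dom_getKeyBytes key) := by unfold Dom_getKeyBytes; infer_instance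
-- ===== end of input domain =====

-- B replaces A's helper split (chunk loop + i bookkeeping) and strToBt's three nested-loop branches by one
-- uniform pad-to-4-then-emit pass per chunk (objective: simpler).

-- ===== PORT A =====
-- strToBt works on the chunk's characters; strings are handled on the List Char side per the PySem convention.
def strToBt (s : List Char) : List Int :=
  let leng : Int := s.length
  -- Python: bt = [None] * 64; every one of the 64 slots is overwritten below before bt is returned,
  -- so the Int 0 placeholders are exact.
  let bt : List Int := List.replicate 64 0
  if leng < 4 then
    let bt := (PySem.List.pyRange 0 leng 1).foldl (fun bt i =>
      -- k = ord(str[i]); i ∈ range(0, leng) is always a valid index, so the pyGetD default is never used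
      let k : Int := (PySem.List.pyGetD s i (Char.ofNat 0)).toNat
      (PySem.List.pyRange 0 16 1).foldl (fun bt j =>
        let pow : Int := (PySem.List.pyRange 15 j (-1)).foldl (fun pow _ => pow * 2) 1
        -- int(k / pow): exact as truncating division since k, pow < 2^53
        PySem.List.pySetD bt (16 * i + j) (PySem.Int.mod (PySem.Int.truncdiv k pow) 2)) bt) bt
    (PySem.List.pyRange leng 4 1).foldl (fun bt p =>
      let k : Int := 0
      (PySem.List.pyRange 0 16 1).foldl (fun bt q =>
        let pow : Int := (PySem.List.pyRange 15 q (-1)).foldl (fun pow _ => pow * 2) 1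
        PySem.List.pySetD bt (16 * p + q) (PySem.Int.mod (PySem.Int.truncdiv k pow) 2)) bt) bt
  else
    (PySem.List.pyRange 0 4 1).foldl (fun bt i =>
      let k : Int := (PySem.List.pyGetD s i (Char.ofNat 0)).toNat
      (PySem.List.pyRange 0 16 1).foldl (fun bt j =>
        let pow : Int := (PySem.List.pyRange 15 j (-1)).foldl (fun pow _ => pow * 2) 1
        PySem.List.pySetD bt (16 * i + j) (PySem.Int.mod (PySem.Int.truncdiv k pow) 2)) bt) bt

def getKeyBytes (key : String) : List (List Int) :=
  let l := key.toList
  let leng : Int := l.length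
  -- int(leng / 4): exact as truncating division since leng < 2^53
  let iterator : Int := PySem.Int.truncdiv leng 4
  let remainder : Int := PySem.Int.mod leng 4
  -- state: (keyBytes, i); the loop body re-binds i to the range value, appends, then does i += 1
  let st := (PySem.List.pyRange 0 iterator 1).foldl
    (fun (st : List (List Int) × Int) i =>
      (st.1 ++ [strToBt (PySem.List.slice l (some (i * 4 + 0)) (some (i * 4 + 4)))], i + 1))
    ([], 0)
  if remainder > 0 then
    st.1 ++ [strToBt (PySem.List.slice l (some (st.2 * 4 + 0)) (some leng))]
  else st.1

-- ===== PORT B =====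
def pvNul : Char := Char.ofNat 0   -- '\x00'

-- [int(b) for b in format(m, '016b')] for 0 ≤ m < 2^16: digit j (MSB first) is (m // 2^(15-j)) % 2
def pvBits16 (m : Int) : List Int :=
  (List.range 16).map (fun j => PySem.Int.mod (PySem.Int.truncdiv m ((2 : Int) ^ (15 - j))) 2)

def getKeyBytes_alt (key : String) : List (List Int) :=
  let l := key.toList
  (PySem.List.pyRange 0 (l.length : Int) 4).foldl
    (fun out start =>
      let chunk := PySem.List.slice
        (PySem.List.slice l (some start) (some (start + 4)) ++ [pvNul, pvNul, pvNul, pvNul])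
        none (some 4)
      out ++ [chunk.flatMap (fun c => pvBits16 (PySem.Int.band ((c.toNat : Int)) 65535))])
    []

-- ===== PRECONDITION & SPEC =====
def Spec_getKeyBytes (key : String) (out : List (List Int)) : Prop := out = getKeyBytes_alt key
instance (key : String) (out : List (List Int)) : Decidable (Spec_getKeyBytes key out) := by unfold Spec_getKeyBytes; infer_instance

-- ===== CLAIM (what is proved, stated in full; the proofs are below) =====
def Claim_equal_getKeyBytes : Prop := ∀ (key : String), Dom_getKeyBytes key → Spec_getKeyBytes key (getKeyBytes key)

-- ===== LEMMAS AND PROOFS =====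

-- B's per-chunk element, as a function of the chunk's characters
def pvChunkBits (cs : List Char) : List Int :=
  ((cs ++ [pvNul, pvNul, pvNul, pvNul]).take 4).flatMap
    (fun c => pvBits16 (PySem.Int.band ((c.toNat : Int)) 65535))

-- the crux: A's 64-bit conversion of a chunk of ≤ 4 chars equals B's pad-then-emit pass
set_option maxRecDepth 40000 in
set_option maxHeartbeats 2000000 in
lemma pv_chunk_eq (cs : List Char) (h4 : cs.length ≤ 4) (hc : ∀ c ∈ cs, c.toNat < 65536) :
    strToBt cs = pvChunkBits cs := by
  have r16 : PySem.List.pyRange 0 16 1 = [0,1,2,3,4,5,6,7,8,9,10,11,12,13,14,15] := by decide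
  have p0 : (PySem.List.pyRange 15 0 (-1)).foldl (fun pow _ => pow * 2) 1 = (2:Int)^15 := by decide
  have p1 : (PySem.List.pyRange 15 1 (-1)).foldl (fun pow _ => pow * 2) 1 = (2:Int)^14 := by decide
  have p2 : (PySem.List.pyRange 15 2 (-1)).foldl (fun pow _ => pow * 2) 1 = (2:Int)^13 := by decide
  have p3 : (PySem.List.pyRange 15 3 (-1)).foldl (fun pow _ => pow * 2) 1 = (2:Int)^12 := by decide
  have p4 : (PySem.List.pyRange 15 4 (-1)).foldl (fun pow _ => pow * 2) 1 = (2:Int)^11 := by decide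
  have p5 : (PySem.List.pyRange 15 5 (-1)).foldl (fun pow _ => pow * 2) 1 = (2:Int)^10 := by decide
  have p6 : (PySem.List.pyRange 15 6 (-1)).foldl (fun pow _ => pow * 2) 1 = (2:Int)^9 := by decide
  have p7 : (PySem.List.pyRange 15 7 (-1)).foldl (fun pow _ => pow * 2) 1 = (2:Int)^8 := by decide
  have p8 : (PySem.List.pyRange 15 8 (-1)).foldl (fun pow _ => pow * 2) 1 = (2:Int)^7 := by decide
  have p9 : (PySem.List.pyRange 15 9 (-1)).foldl (fun pow _ => pow * 2) 1 = (2:Int)^6 := by decide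
  have p10 : (PySem.List.pyRange 15 10 (-1)).foldl (fun pow _ => pow * 2) 1 = (2:Int)^5 := by decide
  have p11 : (PySem.List.pyRange 15 11 (-1)).foldl (fun pow _ => pow * 2) 1 = (2:Int)^4 := by decide
  have p12 : (PySem.List.pyRange 15 12 (-1)).foldl (fun pow _ => pow * 2) 1 = (2:Int)^3 := by decide
  have p13 : (PySem.List.pyRange 15 13 (-1)).foldl (fun pow _ => pow * 2) 1 = (2:Int)^2 := by decide
  have p14 : (PySem.List.pyRange 15 14 (-1)).foldl (fun pow _ => pow * 2) 1 = (2:Int)^1 := by decide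
  have hb : ∀ k : Nat, k < 65536 → PySem.Int.band ((k : Nat) : Int) 65535 = ((k : Nat) : Int) := by
    intro k hk
    rw [show (65535:Int) = ((65535:Nat):Int) by norm_num, PySem.Int.band_natCast,
      Nat.and_two_pow_sub_one_eq_mod k 16]
    norm_num [Nat.mod_eq_of_lt hk]
  match cs, h4, hc with
  | [], _, hc => decide
  | [a], _, hc =>
    have q01 : PySem.List.pyRange 0 1 1 = [0] := by decide
    have q14 : PySem.List.pyRange 1 4 1 = [1,2,3] := by decide
    have hba := hb a.toNat (hc a (by simp))
    simp [strToBt, pvChunkBits, pvBits16, r16, q01, q14, p0,p1,p2,p3,p4,p5,p6,p7,p8,p9,p10,p11,p12,p13,p14, hba,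
      PySem.List.pyGetD, PySem.List.pyGet?, PySem.List.pyIdx?, PySem.List.pySetD_of_nonneg,
      List.foldl, List.replicate, List.set, List.flatMap, List.range_succ]
    all_goals decide
  | [a,b], _, hc =>
    have q02 : PySem.List.pyRange 0 2 1 = [0,1] := by decide
    have q24 : PySem.List.pyRange 2 4 1 = [2,3] := by decide
    have hba := hb a.toNat (hc a (by simp))
    have hbb := hb b.toNat (hc b (by simp))
    simp [strToBt, pvChunkBits, pvBits16, r16, q02, q24, p0,p1,p2,p3,p4,p5,p6,p7,p8,p9,p10,p11,p12,p13,p14, hba, hbb,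
      PySem.List.pyGetD, PySem.List.pyGet?, PySem.List.pyIdx?, PySem.List.pySetD_of_nonneg,
      List.foldl, List.replicate, List.set, List.flatMap, List.range_succ]
    all_goals decide
  | [a,b,c], _, hc =>
    have q03 : PySem.List.pyRange 0 3 1 = [0,1,2] := by decide
    have q34 : PySem.List.pyRange 3 4 1 = [3] := by decide
    have hba := hb a.toNat (hc a (by simp))
    have hbb := hb b.toNat (hc b (by simp))
    have hbc := hb c.toNat (hc c (by simp))
    simp [strToBt, pvChunkBits, pvBits16, r16, q03, q34, p0,p1,p2,p3,p4,p5,p6,p7,p8,p9,p10,p11,p12,p13,p14, hba, hbb, hbc,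
      PySem.List.pyGetD, PySem.List.pyGet?, PySem.List.pyIdx?, PySem.List.pySetD_of_nonneg,
      List.foldl, List.replicate, List.set, List.flatMap, List.range_succ]
    all_goals decide
  | [a,b,c,d], _, hc =>
    have q04 : PySem.List.pyRange 0 4 1 = [0,1,2,3] := by decide
    have hba := hb a.toNat (hc a (by simp))
    have hbb := hb b.toNat (hc b (by simp))
    have hbc := hb c.toNat (hc c (by simp))
    have hbd := hb d.toNat (hc d (by simp))
    simp [strToBt, pvChunkBits, pvBits16, r16, q04, p0,p1,p2,p3,p4,p5,p6,p7,p8,p9,p10,p11,p12,p13,p14, hba, hbb, hbc, hbd,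
      PySem.List.pyGetD, PySem.List.pyGet?, PySem.List.pyIdx?, PySem.List.pySetD_of_nonneg,
      List.foldl, List.replicate, List.set, List.flatMap, List.range_succ]

-- the appending loop with the trailing i += 1, in closed form
lemma pv_foldA (f : Int → List Int) (g : Int → Int) :
    ∀ (r : List Int) (acc : List (List Int)) (x : Int),
      r.foldl (fun st i => (st.1 ++ [f i], g i)) (acc, x)
        = (acc ++ r.map f, r.foldl (fun _ i => g i) x)
  | [], acc, x => by simp
  | i :: r, acc, x => by simp [List.foldl_cons, pv_foldA f g r]

lemma pv_lastPlus (m : Nat) :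
    (PySem.List.pyRange 0 (m : Int) 1).foldl (fun _ i => i + 1) 0 = (m : Int) := by
  cases m with
  | zero => decide
  | succ m =>
    rw [show ((m + 1 : Nat) : Int) = (m : Int) + 1 by push_cast; ring,
        PySem.List.pyRange_one_succ_right (by positivity)]
    simp [List.foldl_append]

lemma pv_truncdiv4 (n : Nat) : PySem.Int.truncdiv (n : Int) 4 = ((n / 4 : Nat) : Int) := by
  simp [PySem.Int.truncdiv]

lemma pv_mod4 (n : Nat) : PySem.Int.mod (n : Int) 4 = ((n % 4 : Nat) : Int) := by
  exact_mod_cast PySem.Int.mod_natCast n 4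

lemma pv_slice4 (l : List Char) (k : Nat) :
    PySem.List.slice l (some ((k : Int) * 4)) (some ((k : Int) * 4 + 4)) = (l.drop (4 * k)).take 4 := by
  rw [show ((k : Int) * 4 + 4) = ((4 * k : Nat) : Int) + ((4 : Nat) : Int) by push_cast; ring,
      show ((k : Int) * 4) = ((4 * k : Nat) : Int) by push_cast; ring]
  exact PySem.List.slice_natCast_add l (4 * k) 4

lemma pv_sliceLast (l : List Char) :
    PySem.List.slice l (some (((l.length / 4 : Nat) : Int) * 4 + 0)) (some ((l.length : Nat) : Int))
      = l.drop (4 * (l.length / 4)) := by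
  rw [show (((l.length / 4 : Nat) : Int) * 4 + 0) = ((4 * (l.length / 4) : Nat) : Int) by push_cast; ring,
      PySem.List.slice_natCast]
  exact List.take_of_length_le (by simp)

lemma pv_A_eq (key : String) :
    getKeyBytes key
      = (List.range (key.toList.length / 4)).map
          (fun t => strToBt ((key.toList.drop (4 * t)).take 4))
        ++ (if key.toList.length % 4 = 0 then []
            else [strToBt (key.toList.drop (4 * (key.toList.length / 4)))]) := by
  simp only [getKeyBytes]
  rw [pv_truncdiv4, pv_mod4,
      pv_foldA (fun i => strToBt (PySem.List.slice key.toList (some (i * 4 + 0)) (some (i * 4 + 4))))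
        (fun i => i + 1),
      pv_lastPlus]
  by_cases hr : key.toList.length % 4 = 0
  · simp only [hr, Nat.cast_zero, gt_iff_lt, lt_irrefl, if_false, if_true, List.nil_append,
      List.append_nil]
    rw [PySem.List.pyRange_one]
    simp only [Int.sub_zero, Int.toNat_natCast, List.map_map]
    refine List.map_congr_left (fun k hk => ?_)
    simp [pv_slice4]
  · rw [if_pos (by omega), if_neg hr, List.nil_append]
    congr 1
    · rw [PySem.List.pyRange_one]
      simp only [Int.sub_zero, Int.toNat_natCast, List.map_map]
      refine List.map_congr_left (fun k hk => ?_)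
      simp [pv_slice4]
    · rw [pv_sliceLast]

lemma pv_B_eq (key : String) :
    getKeyBytes_alt key
      = (List.range ((key.toList.length + 3) / 4)).map
          (fun t => pvChunkBits ((key.toList.drop (4 * t)).take 4)) := by
  simp only [getKeyBytes_alt]
  rw [PySem.List.foldl_append_singleton_eq_map, List.nil_append,
      PySem.List.pyRange_of_pos 0 ((key.toList.length : Nat) : Int) (by norm_num : (0:Int) < 4)]
  rw [show (if (0:Int) < ((key.toList.length : Nat) : Int)
        then ((((key.toList.length : Nat) : Int) - 0 + 4 - 1) / 4).toNat else 0)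
      = (key.toList.length + 3) / 4 by split <;> omega]
  rw [List.map_map]
  refine List.map_congr_left (fun k hk => ?_)
  simp only [Function.comp_apply, zero_add]
  rw [show ((4 : Int) * (k : Int)) = ((4 * k : Nat) : Int) by push_cast; ring]
  rw [show (((4 * k : Nat) : Int) + 4) = ((4 * k : Nat) : Int) + ((4 : Nat) : Int) by norm_num]
  rw [PySem.List.slice_natCast_add, PySem.List.slice_to _ (show (0:Int) ≤ 4 by norm_num)]
  simp [pvChunkBits]

-- ===== VERDICT (by name: the statement is the Claim_ definition above) =====
theorem getKeyBytes_spec : Claim_equal_getKeyBytes := by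
  intro key hdom
  unfold Spec_getKeyBytes
  have hc : ∀ c ∈ key.toList, c.toNat < 65536 := by
    intro c hcmem
    have := List.all_eq_true.mp hdom c hcmem
    simp [pvDomChar] at this
    omega
  rw [pv_A_eq, pv_B_eq]
  have hchunk : ∀ t : Nat, strToBt ((key.toList.drop (4 * t)).take 4)
      = pvChunkBits ((key.toList.drop (4 * t)).take 4) := fun t =>
    pv_chunk_eq _ (List.length_take_le _ _)
      (fun c hcm => hc c (List.mem_of_mem_drop (List.mem_of_mem_take hcm)))
  by_cases hr : key.toList.length % 4 = 0
  · rw [if_pos hr, List.append_nil,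
        show (key.toList.length + 3) / 4 = key.toList.length / 4 by omega]
    exact List.map_congr_left (fun t _ => hchunk t)
  · rw [if_neg hr,
        show (key.toList.length + 3) / 4 = key.toList.length / 4 + 1 by omega,
        List.range_succ, List.map_append, List.map_cons, List.map_nil]
    congr 1
    · exact List.map_congr_left (fun t _ => hchunk t)
    · have hlen : (key.toList.drop (4 * (key.toList.length / 4))).length ≤ 4 := by
        simp; omega
      rw [List.take_of_length_le hlen, pv_chunk_eq _ hlen
        (fun c hcm => hc c (List.mem_of_mem_drop hcm))]
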